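-- pv_equiv track=rewrite | github.com/TGM-HWI-SWP/B.I.E.R | src/bierapp/frontend/flask/helpers.py | compute_category_counts
-- ===== SOURCE A (Python) =====
-- from collections import defaultdict
-- from typing import Dict, List
--
-- def compute_category_counts(products: List[Dict]) -> tuple:
--     """Count how many products belong to each category.
--
--     Args:
--         products: All product documents.
--
--     Returns:
--         A tuple of:
--         - category_labels: list of category names
--         - category_counts: list of counts matching the labels order
--     """
--     counts_by_category: Dict[str, int] = defaultdict(int)
--
--     for product in products:
--         category = product.get("kategorie") or "Sonstige"
--         counts_by_category[category] += 1
--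
--     category_labels = list(counts_by_category.keys())
--     category_counts = list(counts_by_category.values())
--
--     return category_labels, category_counts
-- ===== SOURCE B (Python) =====
-- from typing import Dict, List
--
-- def compute_category_counts(products: List[Dict]) -> tuple:
--     """Count products per category by successive partition: repeatedly take the
--     first remaining category, record it with how many entries it removes, and
--     recurse on the list with that category filtered out."""
--     cats = [product.get("kategorie") or "Sonstige" for product in products]
--     labels, counts = [], []
--     while cats:
--         c = cats[0]
--         rest = [x for x in cats if x != c]
--         labels.append(c)
--         counts.append(len(cats) - len(rest))
--         cats = rest
--     return labels, counts
-- ===== Notes on version B (the rewrite author's own statement) =====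
-- stated objective: alternative
-- what changed: Replaces A's single accumulating defaultdict pass with a dict-free successive-partition loop: build the flat category list, then repeatedly take its first element as the next label, filter out all of its occurrences, and record the count as the length drop, looping on the shrunken remainder.
import Mathlib
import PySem

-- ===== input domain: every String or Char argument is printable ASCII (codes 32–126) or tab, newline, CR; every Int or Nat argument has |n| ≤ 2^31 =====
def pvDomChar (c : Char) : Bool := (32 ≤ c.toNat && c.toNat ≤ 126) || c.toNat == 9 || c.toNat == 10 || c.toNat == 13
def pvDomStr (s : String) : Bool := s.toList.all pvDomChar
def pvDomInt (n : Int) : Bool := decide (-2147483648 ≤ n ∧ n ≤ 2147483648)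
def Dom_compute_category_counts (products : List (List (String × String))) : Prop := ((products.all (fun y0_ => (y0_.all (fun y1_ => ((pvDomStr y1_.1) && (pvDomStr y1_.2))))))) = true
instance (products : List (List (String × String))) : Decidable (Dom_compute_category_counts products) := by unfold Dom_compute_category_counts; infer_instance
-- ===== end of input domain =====

-- B replaces A's single accumulating defaultdict pass by a successive-partition loop: map products to a flat
-- category list, then repeatedly take the first remaining category, filter out all its occurrences and record
-- how many elements that removed; objective: alternative (no dict at all, a shrinking-list partition).

-- ===== PORT A =====
-- shared: category = product.get("kategorie") or "Sonstige"
def pyCat (product : List (String × String)) : String :=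
  match (PySem.Dict.mk product).get? "kategorie" with
  | some c => if c = "" then "Sonstige" else c
  | none => "Sonstige"

def compute_category_counts (products : List (List (String × String))) : List String × List Int :=
  let counts_by_category : PySem.Dict String Int :=
    products.foldl (fun d product =>
      let category := pyCat product
      d.insert category (d.getD category 0 + 1)) PySem.Dict.empty
  (counts_by_category.keys, counts_by_category.values)

-- ===== PORT B =====
-- the 'while cats:' loop of Source B, carrying the labels/counts accumulators
-- 'rest = [x for x in cats if x != c]': c itself fails the test, so filtering cs gives the same list
def partLoop : List String → List String → List Int → List String × List Int
  | [], labels, counts => (labels, counts)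
  | c :: cs, labels, counts =>
    let rest := cs.filter (fun x => x != c)
    partLoop rest (labels ++ [c]) (counts ++ [((c :: cs).length : Int) - rest.length])
termination_by cats _ _ => cats.length
decreasing_by
  simp only [List.length_unattach]
  exact Nat.lt_succ_of_le (le_trans (List.length_filter_le _ _) (le_of_eq List.length_attach))

def compute_category_counts_alt (products : List (List (String × String))) : List String × List Int :=
  let cats := products.map pyCat
  partLoop cats [] []

-- ===== PRECONDITION & SPEC =====
def Spec_compute_category_counts (products : List (List (String × String))) (out : List String × List Int) : Prop := out = compute_category_counts_alt products
instance (products : List (List (String × String))) (out : List String × List Int) : Decidable (Spec_compute_category_counts products out) := by unfold Spec_compute_category_counts; infer_instance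

-- ===== CLAIM (what is proved, stated in full; the proofs are below) =====
def Claim_equal_compute_category_counts : Prop := ∀ (products : List (List (String × String))), Dom_compute_category_counts products → Spec_compute_category_counts products (compute_category_counts products)

-- ===== LEMMAS AND PROOFS =====

-- set(…) commutes with filter
theorem ofList_filter (l : List String) (p : String → Bool) :
    PySem.Set.ofList (l.filter p) = (PySem.Set.ofList l).filter p := by
  induction l using List.reverseRecOn with
  | nil => rfl
  | append_singleton xs x ih =>
    rw [List.filter_append, PySem.Set.ofList_append_singleton]
    by_cases hx : p x = true
    · rw [show List.filter p [x] = [x] by simp [hx], PySem.Set.ofList_append_singleton]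
      by_cases hm : x ∈ PySem.Set.ofList xs
      · have hxs : x ∈ xs := (PySem.Set.mem_ofList _ _).mp hm
        have hmf : x ∈ PySem.Set.ofList (xs.filter p) :=
          (PySem.Set.mem_ofList _ _).mpr (List.mem_filter.mpr ⟨hxs, hx⟩)
        rw [PySem.Set.add_of_mem hm, PySem.Set.add_of_mem hmf, ih]
      · have hxs : x ∉ xs := fun h => hm ((PySem.Set.mem_ofList _ _).mpr h)
        have hmf : x ∉ PySem.Set.ofList (xs.filter p) := fun h =>
          hxs (List.mem_filter.mp ((PySem.Set.mem_ofList _ _).mp h)).1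
        rw [PySem.Set.add_of_not_mem hm, PySem.Set.add_of_not_mem hmf, ih, List.filter_append]
        simp [hx]
    · rw [show List.filter p [x] = [] by simp [hx], List.append_nil, ih]
      by_cases hm : x ∈ PySem.Set.ofList xs
      · rw [PySem.Set.add_of_mem hm]
      · rw [PySem.Set.add_of_not_mem hm, List.filter_append]
        simp [hx]

theorem ofList_cons_filter (c : String) (cs : List String) :
    PySem.Set.ofList (c :: cs) = c :: PySem.Set.ofList (cs.filter (fun x => x != c)) := by
  rw [PySem.Set.ofList_cons, ofList_filter]
  rfl

theorem length_filter_ne_add_count (cs : List String) (c : String) :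
    (List.filter (fun x => x != c) cs).length + List.count c cs = cs.length := by
  induction cs with
  | nil => rfl
  | cons a t ih => by_cases h : a = c <;> simp [h] <;> omega

-- invariant of B's partition loop
theorem partLoop_eq (cats : List String) (labels : List String) (counts : List Int) :
    partLoop cats labels counts =
      (labels ++ PySem.Set.ofList cats,
       counts ++ (PySem.Set.ofList cats).map (fun k => (cats.count k : Int))) := by
  induction cats, labels, counts using partLoop.induct with
  | case1 labels counts => simp [partLoop]
  | case2 c cs labels counts rest ih =>
    have hrest : rest = cs.filter (fun x => x != c) := by simp [rest]
    rw [hrest] at ih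
    rw [partLoop]
    simp only [hrest] at *
    rw [ih, ofList_cons_filter]
    refine Prod.ext (by simp) ?_
    simp only [List.map_cons, List.append_assoc, List.singleton_append]
    congr 2
    · have hlen := length_filter_ne_add_count cs c
      simp only [List.count_cons_self, List.length_cons]
      push_cast
      omega
    · apply List.map_congr_left
      intro k hk
      have hk2 : k ∈ cs.filter (fun x => x != c) := (PySem.Set.mem_ofList _ _).mp hk
      have hne : k ≠ c := by
        rcases List.mem_filter.mp hk2 with ⟨_, h2⟩
        simpa using h2
      rw [List.count_filter]
      have hne2 : ¬ c = k := fun h => hne h.symm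
      simp [hne2]
      exact bne_iff_ne.mpr hne

-- ===== VERDICT (by name: the statement is the Claim_ definition above) =====
theorem compute_category_counts_spec : Claim_equal_compute_category_counts := by
  intro products _
  unfold Spec_compute_category_counts compute_category_counts compute_category_counts_alt
  have h : products.foldl (fun d product =>
      let category := pyCat product
      d.insert category (d.getD category 0 + 1)) PySem.Dict.empty
      = PySem.Dict.counter (products.map pyCat) := by
    rw [← PySem.Dict.foldl_insert_getD_add_one_eq_counter, List.foldl_map]
  rw [partLoop_eq]
  simp [h, PySem.Dict.keys_counter, PySem.Dict.values, PySem.Dict.items_counter]
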